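-- pv_equiv track=rewrite | github.com/nick4barlow/cryptographyFun | cipherBase.py | normalizeSpaces
-- ===== SOURCE A (Python) =====
-- def normalizeSpaces(message):
--     newMessage=""
--     for count in range(message.__len__()):
--         if not message[count]==" ":
--             newMessage+= message[count]
--             pass
--         if message[count]==" " and count>0 and message[count-1]!=" ":
--             newMessage+=" "
--             pass
--         pass
--     return newMessage
-- ===== SOURCE B (Python) =====
-- import re
--
-- def normalizeSpaces(message):
--     return re.sub(' +', ' ', message).lstrip(' ')
-- ===== Notes on version B (the rewrite author's own statement) =====
-- stated objective: faster
-- what changed: Replaced the index-based per-character loop (which looks back at the previous character and builds the result by string concatenation) with a single regex substitution collapsing each run of spaces, plus a left-strip of the leading space.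
import Mathlib
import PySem

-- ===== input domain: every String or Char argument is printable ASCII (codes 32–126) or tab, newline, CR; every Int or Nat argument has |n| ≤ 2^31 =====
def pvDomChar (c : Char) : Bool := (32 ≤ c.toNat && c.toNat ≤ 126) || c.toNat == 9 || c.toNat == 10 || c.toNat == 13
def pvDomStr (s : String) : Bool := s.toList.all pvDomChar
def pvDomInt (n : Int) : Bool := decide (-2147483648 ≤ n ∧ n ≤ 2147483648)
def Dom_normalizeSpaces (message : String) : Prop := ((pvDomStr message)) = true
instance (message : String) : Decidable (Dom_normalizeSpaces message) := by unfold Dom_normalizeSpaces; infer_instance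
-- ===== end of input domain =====

-- B replaces A's index loop by one regex substitution collapsing space runs plus lstrip(' '); same asymptotics, measured constant-factor speedup (regex engine vs per-character Python loop).

-- ===== PORT A =====
-- A: for count in range(len(message)): append message[count] if it is not a space;
--    append ' ' if it is a space, count > 0 and message[count-1] != ' '.
-- The index loop is transliterated as recursion on the index `count`;
-- message[count] / message[count-1] are in-range accesses, so getD is exact there.
def normSpacesLoopA (cs : List Char) (count : Nat) (newMessage : List Char) : List Char :=
  if h : count < cs.length then
    let c := cs.getD count ' '
    let acc1 := if ¬ (c = ' ') then newMessage ++ [c] else newMessage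
    let acc2 := if c = ' ' ∧ count > 0 ∧ cs.getD (count - 1) ' ' ≠ ' ' then acc1 ++ [' '] else acc1
    normSpacesLoopA cs (count + 1) acc2
  else newMessage
termination_by cs.length - count

def normalizeSpaces (message : String) : String :=
  String.ofList (normSpacesLoopA message.toList 0 [])

-- ===== PORT B =====
-- port of re.sub(' +', ' ', message): replace each maximal run of spaces by one space
def collapseSpaces : List Char → List Char
  | [] => []
  | c :: rest =>
    if c = ' ' then ' ' :: collapseSpaces (rest.dropWhile (· = ' '))
    else c :: collapseSpaces rest
termination_by cs => cs.length
decreasing_by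
  · exact Nat.lt_succ_of_le (List.length_dropWhile_le _ _)
  · exact Nat.lt_succ_self _

-- .lstrip(' ') ported as dropWhile (· = ' ')
def normalizeSpaces_alt (message : String) : String :=
  String.ofList ((collapseSpaces message.toList).dropWhile (· = ' '))

-- ===== PRECONDITION & SPEC =====
def Spec_normalizeSpaces (message : String) (out : String) : Prop := out = normalizeSpaces_alt message
instance (message : String) (out : String) : Decidable (Spec_normalizeSpaces message out) := by unfold Spec_normalizeSpaces; infer_instance

-- ===== CLAIM (what is proved, stated in full; the proofs are below) =====
def Claim_equal_normalizeSpaces : Prop := ∀ (message : String), Dom_normalizeSpaces message → Spec_normalizeSpaces message (normalizeSpaces message)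

-- ===== LEMMAS AND PROOFS =====

-- reference function: prevSpace = "previous character was a space (or we are at the start)"
def gRef (prevSpace : Bool) : List Char → List Char
  | [] => []
  | c :: rest =>
    if c = ' ' then
      (if prevSpace then gRef true rest else ' ' :: gRef true rest)
    else c :: gRef false rest

theorem normSpacesLoopA_eq (suffix : List Char) : ∀ (cs : List Char) (count : Nat) (acc : List Char),
    cs.drop count = suffix →
    normSpacesLoopA cs count acc
      = acc ++ gRef (decide (count = 0) || decide (cs.getD (count - 1) ' ' = ' ')) suffix := by
  induction suffix with
  | nil =>
    intro cs count acc hdrop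
    have hlen : cs.length ≤ count := by
      have := congrArg List.length hdrop
      simp [List.length_drop] at this
      omega
    rw [normSpacesLoopA]
    simp [Nat.not_lt.mpr hlen, gRef]
  | cons c rest ih =>
    intro cs count acc hdrop
    have hlt : count < cs.length := by
      have := congrArg List.length hdrop
      simp [List.length_drop] at this
      omega
    have hget : cs[count]? = some c := by
      have h0 : (cs.drop count)[0]? = some c := by rw [hdrop]; rfl
      simpa using h0
    have hgetD : cs.getD count ' ' = c := by
      simp [List.getD, hget]
    have hdrop' : cs.drop (count + 1) = rest := by
      have := congrArg (List.drop 1) hdrop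
      simpa [List.drop_drop, Nat.add_comm] using this
    rw [normSpacesLoopA]
    simp only [dif_pos hlt, hgetD]
    by_cases hc : c = ' '
    · by_cases hprev : (decide (count = 0) || decide (cs.getD (count - 1) ' ' = ' ')) = true
      · have hcond : ¬ (c = ' ' ∧ count > 0 ∧ cs.getD (count - 1) ' ' ≠ ' ') := by
          simp only [Bool.or_eq_true, decide_eq_true_eq] at hprev
          rcases hprev with h0 | hs
          · rintro ⟨_, h1, _⟩; omega
          · rintro ⟨_, _, h2⟩; exact h2 hs
        rw [if_neg hcond, if_neg (not_not_intro hc)]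
        rw [ih cs (count + 1) acc hdrop']
        have hf : (decide (count + 1 = 0) || decide (cs.getD (count + 1 - 1) ' ' = ' ')) = true := by
          simp only [Nat.add_sub_cancel, hgetD]
          simp [hc]
        rw [hf, hprev]
        simp [gRef, hc]
      · have hprev' : (decide (count = 0) || decide (cs.getD (count - 1) ' ' = ' ')) = false := by
          simpa using hprev
        simp only [Bool.or_eq_false_iff, decide_eq_false_iff_not] at hprev'
        have hcond : (c = ' ' ∧ count > 0 ∧ cs.getD (count - 1) ' ' ≠ ' ') :=
          ⟨hc, by omega, hprev'.2⟩
        rw [if_pos hcond, if_neg (not_not_intro hc)]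
        rw [ih cs (count + 1) (acc ++ [' ']) hdrop']
        have hf : (decide (count + 1 = 0) || decide (cs.getD (count + 1 - 1) ' ' = ' ')) = true := by
          simp only [Nat.add_sub_cancel, hgetD]
          simp [hc]
        rw [hf]
        have : (decide (count = 0) || decide (cs.getD (count - 1) ' ' = ' ')) = false := by
          simp only [Bool.or_eq_false_iff, decide_eq_false_iff_not]
          exact ⟨hprev'.1, hprev'.2⟩
        rw [this]
        simp [gRef, hc]
    · have hcond : ¬ (c = ' ' ∧ count > 0 ∧ cs.getD (count - 1) ' ' ≠ ' ') := by
        rintro ⟨h, _, _⟩; exact hc h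
      rw [if_neg hcond, if_pos hc]
      rw [ih cs (count + 1) (acc ++ [c]) hdrop']
      have hf : (decide (count + 1 = 0) || decide (cs.getD (count + 1 - 1) ' ' = ' ')) = false := by
        simp only [Nat.add_sub_cancel, hgetD]
        simp [hc]
      rw [hf]
      cases hb : (decide (count = 0) || decide (cs.getD (count - 1) ' ' = ' ')) <;>
        simp [gRef, hc]

theorem gRef_true_eq (cs : List Char) : gRef true cs = gRef false (cs.dropWhile (· = ' ')) := by
  induction cs with
  | nil => simp [gRef, List.dropWhile]
  | cons c rest ih =>
    by_cases hc : c = ' '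
    · simp [gRef, hc, List.dropWhile, ih]
    · simp [gRef, hc, List.dropWhile]

theorem collapseSpaces_eq_gRef_false (cs : List Char) : collapseSpaces cs = gRef false cs := by
  induction cs using collapseSpaces.induct with
  | case1 => simp [collapseSpaces, gRef]
  | case2 rest ih =>
    rw [collapseSpaces, gRef, ih, gRef_true_eq]
    simp
  | case3 c rest hc ih =>
    rw [collapseSpaces, gRef, if_neg hc, if_neg hc, ih]

-- gRef false of an already-left-stripped list starts with a non-space, so dropWhile fixes it
theorem dropWhile_gRef_false_dropWhile (r : List Char) :
    (gRef false (r.dropWhile (· = ' '))).dropWhile (· = ' ')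
      = gRef false (r.dropWhile (· = ' ')) := by
  induction r with
  | nil => simp [List.dropWhile, gRef]
  | cons c t ih =>
    by_cases hc : c = ' '
    · simpa [List.dropWhile, hc] using ih
    · simp [List.dropWhile, hc, gRef]

theorem dropWhile_gRef_false (cs : List Char) :
    (gRef false cs).dropWhile (· = ' ') = gRef false (cs.dropWhile (· = ' ')) := by
  cases cs with
  | nil => simp [gRef, List.dropWhile]
  | cons c rest =>
    by_cases hc : c = ' '
    · rw [gRef, if_pos hc]
      simp only [Bool.false_eq_true, if_false]
      rw [gRef_true_eq]
      rw [List.dropWhile_cons_of_pos (by simp)]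
      rw [List.dropWhile_cons_of_pos (by simp [hc])]
      exact dropWhile_gRef_false_dropWhile rest
    · rw [gRef, if_neg hc]
      rw [List.dropWhile_cons_of_neg (by simp [hc])]
      rw [List.dropWhile_cons_of_neg (by simp [hc])]
      rw [gRef]
      simp [hc]

-- ===== VERDICT (by name: the statement is the Claim_ definition above) =====
theorem normalizeSpaces_spec : Claim_equal_normalizeSpaces := by
  intro message _
  unfold Spec_normalizeSpaces normalizeSpaces normalizeSpaces_alt
  rw [normSpacesLoopA_eq message.toList message.toList 0 [] (by simp)]
  simp only [decide_true, Bool.true_or, List.nil_append]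
  rw [collapseSpaces_eq_gRef_false, dropWhile_gRef_false, gRef_true_eq]
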